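-- pv_equiv track=rewrite | github.com/033-Archita/LectureAI | formatter.py | add_page_breaks
-- ===== SOURCE A (Python) =====
-- def add_page_breaks(notes: str, every_n_sections: int = 3) -> str:
--     """
--     Add page break markers for printing
--
--     Args:
--         notes: Formatted notes
--         every_n_sections: Add break after every N sections
--
--     Returns:
--         Notes with page break markers
--     """
--     lines = notes.split('\n')
--     result = []
--     section_count = 0
--
--     for line in lines:
--         result.append(line)
--
--         if line.strip().startswith('#'):
--             section_count += 1
--             if section_count % every_n_sections == 0:
--                 result.append('\n<div style="page-break-after: always;"></div>\n')
--
--     return '\n'.join(result)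
-- ===== SOURCE B (Python) =====
-- PAGE_BREAK = '\n<div style="page-break-after: always;"></div>\n'
--
--
-- def add_page_breaks(notes: str, every_n_sections: int = 3) -> str:
--     """Two-phase rewrite: first compute a break flag per line, then assemble
--     the output with a flat comprehension over the (line, flag) pairs."""
--     lines = notes.split('\n')
--     flags = []
--     count = 0
--     for line in lines:
--         is_break = False
--         if line.strip().startswith('#'):
--             count += 1
--             is_break = (count % every_n_sections == 0)
--         flags.append(is_break)
--     pieces = [seg for line, f in zip(lines, flags)
--               for seg in ([line, PAGE_BREAK] if f else [line])]
--     return '\n'.join(pieces)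
-- ===== Notes on version B (the rewrite author's own statement) =====
-- stated objective: alternative
-- what changed: B replaces A's single fold that interleaves counting and output-building with a two-phase decomposition: a first pass computes a per-line break flag, and a flat comprehension over zip(lines, flags) assembles the pieces; same O(n) cost.
import Mathlib
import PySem

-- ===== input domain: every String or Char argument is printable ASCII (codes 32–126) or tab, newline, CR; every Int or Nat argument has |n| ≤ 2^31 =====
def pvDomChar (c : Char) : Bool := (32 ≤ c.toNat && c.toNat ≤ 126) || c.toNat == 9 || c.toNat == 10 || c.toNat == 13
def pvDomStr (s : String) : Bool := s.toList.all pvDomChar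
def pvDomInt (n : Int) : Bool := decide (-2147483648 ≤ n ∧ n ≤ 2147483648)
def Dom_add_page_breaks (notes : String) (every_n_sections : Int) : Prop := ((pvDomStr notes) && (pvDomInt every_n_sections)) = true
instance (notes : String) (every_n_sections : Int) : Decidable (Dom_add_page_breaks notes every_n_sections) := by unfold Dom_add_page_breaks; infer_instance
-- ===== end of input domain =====

-- B changes the decomposition (flags pass + flat assembly) instead of A's single
-- fold interleaving counting and output; same cost, return value proved equal.

-- s.split('\n'): sep is the nonempty literal "\n", so split? is always some (exact)
def pbSplit (s : String) : List String := (PySem.Str.split? s "\n").getD []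

def pbMarker : String := "\n<div style=\"page-break-after: always;\"></div>\n"

-- ===== PORT A =====
def add_page_breaks (notes : String) (every_n_sections : Int) : String :=
  let lines := pbSplit notes
  let st := lines.foldl (fun (st : List String × Int) line =>
    let result := st.1 ++ [line]
    if PySem.Str.startswith (PySem.Str.strip line) "#" then
      let c := st.2 + 1
      if PySem.Int.mod c every_n_sections == 0 then (result ++ [pbMarker], c)
      else (result, c)
    else (result, st.2)) ([], 0)
  PySem.Str.join "\n" st.1

-- ===== PORT B =====
-- first pass of Source B: one break flag per line
def pbFlags (lines : List String) (every_n_sections : Int) : List Bool :=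
  (lines.foldl (fun (st : List Bool × Int) line =>
    if PySem.Str.startswith (PySem.Str.strip line) "#" then
      let c := st.2 + 1
      (st.1 ++ [PySem.Int.mod c every_n_sections == 0], c)
    else (st.1 ++ [false], st.2)) ([], 0)).1

def add_page_breaks_alt (notes : String) (every_n_sections : Int) : String :=
  let lines := pbSplit notes
  let pieces := (lines.zip (pbFlags lines every_n_sections)).flatMap
    (fun p => if p.2 then [p.1, pbMarker] else [p.1])
  PySem.Str.join "\n" pieces

-- ===== PRECONDITION & SPEC =====
-- Pre_ excludes exactly the inputs on which Python A raises ZeroDivisionError: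
-- every_n_sections = 0 together with at least one heading line.
def Pre_add_page_breaks (notes : String) (every_n_sections : Int) : Prop :=
  every_n_sections ≠ 0 ∨
    (pbSplit notes).all
      (fun l => !PySem.Str.startswith (PySem.Str.strip l) "#") = true
instance (notes : String) (every_n_sections : Int) : Decidable (Pre_add_page_breaks notes every_n_sections) := by unfold Pre_add_page_breaks; infer_instance

def pvWitness_add_page_breaks : String × Int := ("# intro\ntext\n# more", 2)

def Spec_add_page_breaks (notes : String) (every_n_sections : Int) (out : String) : Prop := out = add_page_breaks_alt notes every_n_sections
instance (notes : String) (every_n_sections : Int) (out : String) : Decidable (Spec_add_page_breaks notes every_n_sections out) := by unfold Spec_add_page_breaks; infer_instance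

-- ===== CLAIM (what is proved, stated in full; the proofs are below) =====
def Claim_equal_add_page_breaks : Prop := ∀ (notes : String) (every_n_sections : Int), Dom_add_page_breaks notes every_n_sections → Pre_add_page_breaks notes every_n_sections → Spec_add_page_breaks notes every_n_sections (add_page_breaks notes every_n_sections)

-- ===== LEMMAS AND PROOFS =====

-- the per-line flags, written as structural recursion on the lines with the running
-- count; parametric in the heading test p and the break test m so the lemmas below
-- apply to both ports' folds syntactically
def pbFlagsRec (p : String → Bool) (m : Int → Bool) : List String → Int → List Bool
  | [], _ => []
  | l :: ls, c =>
    if p l then (m (c + 1)) :: pbFlagsRec p m ls (c + 1)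
    else false :: pbFlagsRec p m ls c

theorem pbFlags_fold_eq (p : String → Bool) (m : Int → Bool) (lines : List String) :
    ∀ (fs : List Bool) (c : Int),
      (lines.foldl (fun (st : List Bool × Int) line =>
        if p line = true then (st.1 ++ [m (st.2 + 1)], st.2 + 1)
        else (st.1 ++ [false], st.2)) (fs, c)).1 = fs ++ pbFlagsRec p m lines c := by
  induction lines with
  | nil => intro fs c; simp [pbFlagsRec]
  | cons l ls ih =>
    intro fs c
    rw [List.foldl_cons]
    by_cases h : p l = true
    · rw [if_pos h, ih]
      simp [pbFlagsRec, h]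
    · rw [if_neg h, ih]
      simp [pbFlagsRec, h]

theorem foldA_eq (p : String → Bool) (m : Int → Bool) (lines : List String) :
    ∀ (acc : List String) (c : Int),
      (lines.foldl (fun (st : List String × Int) line =>
        if p line = true then
          if m (st.2 + 1) = true then (st.1 ++ [line] ++ [pbMarker], st.2 + 1)
          else (st.1 ++ [line], st.2 + 1)
        else (st.1 ++ [line], st.2)) (acc, c)).1 =
      acc ++ (lines.zip (pbFlagsRec p m lines c)).flatMap
        (fun q => if q.2 then [q.1, pbMarker] else [q.1]) := by
  induction lines with
  | nil => intro acc c; simp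
  | cons l ls ih =>
    intro acc c
    rw [List.foldl_cons]
    by_cases h : p l = true
    · by_cases hm : m (c + 1) = true
      · rw [if_pos h, if_pos hm, ih]
        simp [pbFlagsRec, h, hm]
      · rw [if_pos h, if_neg hm, ih]
        simp [pbFlagsRec, h, hm]
    · rw [if_neg h, ih]
      simp [pbFlagsRec, h]

-- instantiated, beta-reduced forms of the two fold lemmas, used by the verdict proof
theorem foldA_eq' (n : Int) (lines : List String) (acc : List String) (c : Int) :
    (lines.foldl (fun (st : List String × Int) line =>
      if PySem.Str.startswith (PySem.Str.strip line) "#" = true then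
        if (PySem.Int.mod (st.2 + 1) n == 0) = true then (st.1 ++ [line] ++ [pbMarker], st.2 + 1)
        else (st.1 ++ [line], st.2 + 1)
      else (st.1 ++ [line], st.2)) (acc, c)).1 =
    acc ++ (lines.zip (pbFlagsRec (fun line => PySem.Str.startswith (PySem.Str.strip line) "#")
        (fun c => PySem.Int.mod c n == 0) lines c)).flatMap
      (fun q => if q.2 then [q.1, pbMarker] else [q.1]) :=
  foldA_eq (fun line => PySem.Str.startswith (PySem.Str.strip line) "#")
    (fun c => PySem.Int.mod c n == 0) lines acc c

theorem pbFlags_fold_eq' (n : Int) (lines : List String) (fs : List Bool) (c : Int) :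
    (lines.foldl (fun (st : List Bool × Int) line =>
      if PySem.Str.startswith (PySem.Str.strip line) "#" = true then
        (st.1 ++ [PySem.Int.mod (st.2 + 1) n == 0], st.2 + 1)
      else (st.1 ++ [false], st.2)) (fs, c)).1 =
    fs ++ pbFlagsRec (fun line => PySem.Str.startswith (PySem.Str.strip line) "#")
      (fun c => PySem.Int.mod c n == 0) lines c :=
  pbFlags_fold_eq (fun line => PySem.Str.startswith (PySem.Str.strip line) "#")
    (fun c => PySem.Int.mod c n == 0) lines fs c

-- ===== VERDICT (by name: the statement is the Claim_ definition above) =====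
theorem add_page_breaks_spec : Claim_equal_add_page_breaks := by
  intro notes n _ _
  unfold Spec_add_page_breaks add_page_breaks add_page_breaks_alt pbFlags
  show PySem.Str.join "\n"
      ((pbSplit notes).foldl (fun (st : List String × Int) line =>
        if PySem.Str.startswith (PySem.Str.strip line) "#" = true then
          if (PySem.Int.mod (st.2 + 1) n == 0) = true then (st.1 ++ [line] ++ [pbMarker], st.2 + 1)
          else (st.1 ++ [line], st.2 + 1)
        else (st.1 ++ [line], st.2)) ([], 0)).1 =
    PySem.Str.join "\n"
      (((pbSplit notes).zip ((pbSplit notes).foldl (fun (st : List Bool × Int) line =>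
        if PySem.Str.startswith (PySem.Str.strip line) "#" = true then
          (st.1 ++ [PySem.Int.mod (st.2 + 1) n == 0], st.2 + 1)
        else (st.1 ++ [false], st.2)) ([], 0)).1).flatMap
        (fun q => if q.2 then [q.1, pbMarker] else [q.1]))
  rw [foldA_eq', pbFlags_fold_eq', List.nil_append, List.nil_append]
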